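-- pv_equiv track=rewrite | github.com/Frank100kgbenchpress/HEX-AI | solution.py | _pruned_expansion_moves
-- ===== SOURCE A (Python) =====
-- from typing import Dict, List, Optional, Set, Tuple
--
-- Move = Tuple[int, int]
--
-- def _pruned_expansion_moves(matrix: List[List[int]], player_id: int) -> List[Move]:
-- 	enemy_id = 2 if player_id == 1 else 1
-- 	n = len(matrix)
-- 	occupied: List[Move] = []
-- 	legal: List[Move] = []
-- 	for r in range(n):
-- 		for c in range(n):
-- 			if matrix[r][c] == 0:
-- 				legal.append((r, c))
-- 			else:
-- 				occupied.append((r, c))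
--
-- 	if not legal:
-- 		return []
-- 	if not occupied:
-- 		return legal
--
-- 	# A. "Must-Play" - Si hay un puente amenazado por el oponente, es mandatorio defenderlo.
-- 	must_play = []
-- 	for move in legal:
-- 		if _threatened_bridge_count(matrix, move, player_id, enemy_id) > 0:
-- 			must_play.append(move)
-- 	if must_play:
-- 		return must_play
--
-- 	# C. Distancia a la Línea de Frente
-- 	candidates: Set[Move] = set()
-- 	for r, c in occupied:
-- 		for n1r, n1c in _neighbors_even_r(r, c, n):
-- 			if matrix[n1r][n1c] == 0:
-- 				candidates.add((n1r, n1c))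
-- 			for n2r, n2c in _neighbors_even_r(n1r, n1c, n):
-- 				if matrix[n2r][n2c] == 0:
-- 					candidates.add((n2r, n2c))
--
-- 	if not candidates:
-- 		return legal
--
-- 	pruned = []
-- 	for move in legal:
-- 		if move not in candidates:
-- 			continue
--
-- 		# B. Celdas capturadas / sin vecinos vacíos
-- 		r, c = move
-- 		empty_neighbors = 0
-- 		for nr, nc in _neighbors_even_r(r, c, n):
-- 			if matrix[nr][nc] == 0:
-- 				empty_neighbors += 1
--
-- 		if empty_neighbors == 0 and len(legal) > 1:
-- 			continue
--
-- 		pruned.append(move)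
--
-- 	# Mantener orden para consistencia predictiva
-- 	return pruned if pruned else legal
--
-- def _neighbors_even_r(r: int, c: int, n: int):
-- 	if r % 2 == 0:
-- 		deltas = [(-1, -1), (-1, 0), (0, -1), (0, 1), (1, -1), (1, 0)]
-- 	else:
-- 		deltas = [(-1, 0), (-1, 1), (0, -1), (0, 1), (1, 0), (1, 1)]
-- 	for dr, dc in deltas:
-- 		nr, nc = r + dr, c + dc
-- 		if 0 <= nr < n and 0 <= nc < n:
-- 			yield nr, nc
--
-- def _threatened_bridge_count(
-- 	matrix: List[List[int]],
-- 	move: Move,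
-- 	player_id: int,
-- 	enemy_id: int,
-- ) -> int:
-- 	r, c = move
-- 	n = len(matrix)
-- 	neighbors_move = list(_neighbors_even_r(r, c, n))
-- 	neighbors_move_set = set(neighbors_move)
--
-- 	count = 0
-- 	for er, ec in neighbors_move:
-- 		if matrix[er][ec] != enemy_id:
-- 			continue
-- 		common = neighbors_move_set.intersection(set(_neighbors_even_r(er, ec, n)))
-- 		own_endpoints = 0
-- 		for pr, pc in common:
-- 			if matrix[pr][pc] == player_id:
-- 				own_endpoints += 1
-- 		if own_endpoints >= 2:
-- 			count += 1
-- 	return count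
-- ===== SOURCE B (Python) =====
-- from typing import List, Tuple
--
-- Move = Tuple[int, int]
--
-- def _neighbors_even_r(r, c, n):
-- 	if r % 2 == 0:
-- 		deltas = [(-1, -1), (-1, 0), (0, -1), (0, 1), (1, -1), (1, 0)]
-- 	else:
-- 		deltas = [(-1, 0), (-1, 1), (0, -1), (0, 1), (1, 0), (1, 1)]
-- 	for dr, dc in deltas:
-- 		nr, nc = r + dr, c + dc
-- 		if 0 <= nr < n and 0 <= nc < n:
-- 			yield nr, nc
--
-- def _has_threatened_bridge(matrix, move, player_id, enemy_id):
-- 	r, c = move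
-- 	n = len(matrix)
-- 	nbrs = list(_neighbors_even_r(r, c, n))
-- 	for er, ec in nbrs:
-- 		if matrix[er][ec] != enemy_id:
-- 			continue
-- 		endpoints = [p for p in nbrs
-- 		             if p in list(_neighbors_even_r(er, ec, n))
-- 		             and matrix[p[0]][p[1]] == player_id]
-- 		if len(endpoints) >= 2:
-- 			return True
-- 	return False
--
-- def _pruned_expansion_moves(matrix: List[List[int]], player_id: int) -> List[Move]:
-- 	enemy_id = 2 if player_id == 1 else 1
-- 	n = len(matrix)
-- 	legal = [(r, c) for r in range(n) for c in range(n) if matrix[r][c] == 0]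
-- 	if not legal:
-- 		return []
-- 	if len(legal) == n * n:
-- 		return legal
--
-- 	must_play = [m for m in legal
-- 	             if _has_threatened_bridge(matrix, m, player_id, enemy_id)]
-- 	if must_play:
-- 		return must_play
--
-- 	multi = len(legal) > 1
-- 	pruned = []
-- 	for r, c in legal:
-- 		nbrs = list(_neighbors_even_r(r, c, n))
-- 		near = any(matrix[ar][ac] != 0 for ar, ac in nbrs) or any(
-- 			matrix[br][bc] != 0
-- 			for ar, ac in nbrs
-- 			for br, bc in _neighbors_even_r(ar, ac, n))
-- 		if not near:
-- 			continue
-- 		empties = sum(1 for ar, ac in nbrs if matrix[ar][ac] == 0)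
-- 		if empties == 0 and multi:
-- 			continue
-- 		pruned.append((r, c))
--
-- 	return pruned if pruned else legal
-- ===== Notes on version B (the rewrite author's own statement) =====
-- stated objective: faster
-- what changed: B replaces A's outward expansion from the occupied cells (materialising a candidate set, then a separate prune loop over legal) with a single pass over the empty cells that tests 1-/2-hop proximity to an occupied cell directly via the symmetry of the hex neighbour relation, and replaces the set-intersection bridge count with a short-circuiting any/filter test; the 'no occupied cell' early return becomes a len(legal)==n*n check.
import Mathlib
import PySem

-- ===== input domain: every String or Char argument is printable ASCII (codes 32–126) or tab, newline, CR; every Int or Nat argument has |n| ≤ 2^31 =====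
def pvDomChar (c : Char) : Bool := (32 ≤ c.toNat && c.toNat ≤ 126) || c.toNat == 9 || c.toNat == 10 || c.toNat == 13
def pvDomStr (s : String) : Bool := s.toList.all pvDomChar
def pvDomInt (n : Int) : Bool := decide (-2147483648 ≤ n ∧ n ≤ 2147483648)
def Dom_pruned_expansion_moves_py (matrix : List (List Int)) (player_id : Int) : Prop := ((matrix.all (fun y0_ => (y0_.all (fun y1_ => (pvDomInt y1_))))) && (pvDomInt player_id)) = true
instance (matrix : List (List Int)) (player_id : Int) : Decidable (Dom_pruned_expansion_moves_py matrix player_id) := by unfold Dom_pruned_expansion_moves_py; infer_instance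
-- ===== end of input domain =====

-- B replaces A's outward expansion from occupied cells (building a candidate set, then a
-- separate prune pass) by a single short-circuiting pass over the empty cells testing 1-/2-hop
-- proximity directly; same return value, measurably faster in a timing run.

-- ===== PORT A =====

-- in-bounds test '0 <= nr < n and 0 <= nc < n'
def pvInb (n r c : Int) : Bool := decide (0 ≤ r) && decide (r < n) && decide (0 ≤ c) && decide (c < n)

-- _neighbors_even_r (used as a helper by both Pythons)
def pvNbrs (r c n : Int) : List (Int × Int) :=
  let deltas : List (Int × Int) :=
    if PySem.Int.mod r 2 == 0 then [(-1,-1),(-1,0),(0,-1),(0,1),(1,-1),(1,0)]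
    else [(-1,0),(-1,1),(0,-1),(0,1),(1,0),(1,1)]
  (deltas.map (fun d => (r + d.1, c + d.2))).filter (fun p => pvInb n p.1 p.2)

-- matrix[r][c]; the defaults are never reached under Pre_ (all indices are in bounds)
def pvCell (m : List (List Int)) (r c : Int) : Int := PySem.List.pyGetD (PySem.List.pyGetD m r []) c 0

-- _threatened_bridge_count; the Python iterates the set 'common' only to COUNT, which is
-- independent of the (unmodelled) hash order, so the fold runs over Set.inter's order.
def pvBridgeCount (m : List (List Int)) (mv : Int × Int) (pid eid : Int) : Int :=
  let n : Int := (m.length : Int)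
  let nm := pvNbrs mv.1 mv.2 n
  let nmSet : PySem.Set (Int × Int) := PySem.Set.ofList nm
  nm.foldl (fun count e =>
    if pvCell m e.1 e.2 ≠ eid then count
    else
      let common := PySem.Set.inter nmSet (PySem.Set.ofList (pvNbrs e.1 e.2 n))
      let own : Int := common.foldl (fun own p => if pvCell m p.1 p.2 = pid then own + 1 else own) 0
      if own ≥ 2 then count + 1 else count) 0

def pruned_expansion_moves_py (matrix : List (List Int)) (player_id : Int) : List (Int × Int) :=
  let enemy_id : Int := if player_id = 1 then 2 else 1
  let n : Int := (matrix.length : Int)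
  let ol := (PySem.List.pyRange 0 n 1).foldl (fun ol r =>
      (PySem.List.pyRange 0 n 1).foldl (fun (ol : List (Int × Int) × List (Int × Int)) c =>
        if pvCell matrix r c = 0 then (ol.1, ol.2 ++ [(r, c)]) else (ol.1 ++ [(r, c)], ol.2)) ol)
      (([], []) : List (Int × Int) × List (Int × Int))
  let occupied := ol.1
  let legal := ol.2
  if legal = [] then []
  else if occupied = [] then legal
  else
    let must_play := legal.foldl (fun acc mv =>
      if pvBridgeCount matrix mv player_id enemy_id > 0 then acc ++ [mv] else acc) []
    if must_play ≠ [] then must_play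
    else
      let candidates : PySem.Set (Int × Int) :=
        occupied.foldl (fun s rc =>
          (pvNbrs rc.1 rc.2 n).foldl (fun s n1 =>
            let s := if pvCell matrix n1.1 n1.2 = 0 then PySem.Set.add s n1 else s
            (pvNbrs n1.1 n1.2 n).foldl (fun s n2 =>
              if pvCell matrix n2.1 n2.2 = 0 then PySem.Set.add s n2 else s) s) s) PySem.Set.empty
      if candidates = [] then legal
      else
        let pruned := legal.foldl (fun acc mv =>
          if ¬ (mv ∈ candidates) then acc
          else
            let empty_neighbors : Int := (pvNbrs mv.1 mv.2 n).foldl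
              (fun k p => if pvCell matrix p.1 p.2 = 0 then k + 1 else k) 0
            if empty_neighbors = 0 ∧ legal.length > 1 then acc else acc ++ [mv]) []
        if pruned ≠ [] then pruned else legal

-- ===== PORT B =====

-- _has_threatened_bridge (early-return loop = List.any)
def pvHasBridge (m : List (List Int)) (mv : Int × Int) (pid eid : Int) : Bool :=
  let n : Int := (m.length : Int)
  let nbrs := pvNbrs mv.1 mv.2 n
  nbrs.any (fun e =>
    decide (pvCell m e.1 e.2 = eid) &&
    decide (2 ≤ (nbrs.filter (fun p => decide (p ∈ pvNbrs e.1 e.2 n) &&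
      decide (pvCell m p.1 p.2 = pid))).length))

def pruned_expansion_moves_py_alt (matrix : List (List Int)) (player_id : Int) : List (Int × Int) :=
  let enemy_id : Int := if player_id = 1 then 2 else 1
  let n : Int := (matrix.length : Int)
  let legal := (PySem.List.pyRange 0 n 1).flatMap (fun r =>
    ((PySem.List.pyRange 0 n 1).filter (fun c => decide (pvCell matrix r c = 0))).map (fun c => (r, c)))
  if legal = [] then []
  else if (legal.length : Int) = n * n then legal
  else
    let must_play := legal.filter (fun mv => pvHasBridge matrix mv player_id enemy_id)
    if must_play ≠ [] then must_play
    else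
      let multi := decide (legal.length > 1)
      let pruned := legal.filter (fun mv =>
        let nbrs := pvNbrs mv.1 mv.2 n
        let near := nbrs.any (fun a => decide (¬ pvCell matrix a.1 a.2 = 0)) ||
          nbrs.any (fun a => (pvNbrs a.1 a.2 n).any (fun b => decide (¬ pvCell matrix b.1 b.2 = 0)))
        let empties := nbrs.countP (fun a => decide (pvCell matrix a.1 a.2 = 0))
        near && !(decide (empties = 0) && multi))
      if pruned ≠ [] then pruned else legal

-- ===== PRECONDITION & SPEC =====
-- Pre_ excludes exactly the inputs where Python A raises IndexError: a row shorter than the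
-- number of rows (every cell matrix[r][c], r,c < len(matrix), is read before any return).
def Pre_pruned_expansion_moves_py (matrix : List (List Int)) (player_id : Int) : Prop :=
  ∀ row ∈ matrix, matrix.length ≤ row.length
instance (matrix : List (List Int)) (player_id : Int) : Decidable (Pre_pruned_expansion_moves_py matrix player_id) := by unfold Pre_pruned_expansion_moves_py; infer_instance

def pvWitness_pruned_expansion_moves_py : List (List Int) × Int := ([[1, 0], [0, 0]], 1)

def Spec_pruned_expansion_moves_py (matrix : List (List Int)) (player_id : Int) (out : List (Int × Int)) : Prop := out = pruned_expansion_moves_py_alt matrix player_id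
instance (matrix : List (List Int)) (player_id : Int) (out : List (Int × Int)) : Decidable (Spec_pruned_expansion_moves_py matrix player_id out) := by unfold Spec_pruned_expansion_moves_py; infer_instance

-- ===== CLAIM (what is proved, stated in full; the proofs are below) =====
def Claim_equal_pruned_expansion_moves_py : Prop := ∀ (matrix : List (List Int)) (player_id : Int), Dom_pruned_expansion_moves_py matrix player_id → Pre_pruned_expansion_moves_py matrix player_id → Spec_pruned_expansion_moves_py matrix player_id (pruned_expansion_moves_py matrix player_id)

-- ===== LEMMAS AND PROOFS =====

-- arithmetic characterisation of the even-r offset adjacency (symmetric form)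
def pvAdj (r c r' c' : Int) : Prop :=
  (r' = r ∧ (c' = c - 1 ∨ c' = c + 1)) ∨
  ((r' = r + 1 ∨ r' = r - 1) ∧ (c' = c - 1 + r % 2 ∨ c' = c + r % 2))

theorem pvAdj_symm {r c r' c' : Int} : pvAdj r c r' c' ↔ pvAdj r' c' r c := by
  unfold pvAdj; omega

theorem mem_pvNbrs {n r c : Int} (hr : 0 ≤ r) (x : Int × Int) :
    x ∈ pvNbrs r c n ↔
      ((0 ≤ x.1 ∧ x.1 < n ∧ 0 ≤ x.2 ∧ x.2 < n) ∧ pvAdj r c x.1 x.2) := by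
  obtain ⟨a, b⟩ := x
  have hm : PySem.Int.mod r 2 = r % 2 := PySem.Int.mod_eq_emod_of_pos (by omega)
  have h2 : r % 2 = 0 ∨ r % 2 = 1 := by omega
  unfold pvNbrs pvInb pvAdj
  rcases h2 with h | h <;>
    simp [hm, h, List.mem_filter, List.mem_map, Prod.ext_iff] <;>
    constructor <;> intro hh <;> omega

theorem bounds_of_mem_pvNbrs {n r c : Int} {x : Int × Int} (h : x ∈ pvNbrs r c n) :
    0 ≤ x.1 ∧ x.1 < n ∧ 0 ≤ x.2 ∧ x.2 < n := by
  unfold pvNbrs at h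
  simp only [List.mem_filter, pvInb] at h
  have := h.2
  simp only [Bool.and_eq_true, decide_eq_true_eq] at this
  tauto

theorem pvNbrs_symm {n : Int} {x y : Int × Int}
    (hx : 0 ≤ x.1 ∧ x.1 < n ∧ 0 ≤ x.2 ∧ x.2 < n)
    (hy : 0 ≤ y.1 ∧ y.1 < n ∧ 0 ≤ y.2 ∧ y.2 < n) :
    x ∈ pvNbrs y.1 y.2 n ↔ y ∈ pvNbrs x.1 x.2 n := by
  rw [mem_pvNbrs hy.1, mem_pvNbrs hx.1]
  constructor
  · intro h; exact ⟨hy, pvAdj_symm.mp h.2⟩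
  · intro h; exact ⟨hx, pvAdj_symm.mp h.2⟩

theorem nodup_pvNbrs (r c n : Int) : (pvNbrs r c n).Nodup := by
  unfold pvNbrs
  apply List.Nodup.filter
  apply List.Nodup.map
  · intro d1 d2 h
    obtain ⟨a, b⟩ := d1; obtain ⟨a', b'⟩ := d2
    simp only [Prod.ext_iff] at h ⊢
    omega
  · split <;> decide

-- generic membership through a fold whose step adds elements characterised by P
theorem pv_mem_foldl {α β : Type} (st : List α → β → List α) (P : β → α → Prop)
    (h : ∀ s b y, y ∈ st s b ↔ y ∈ s ∨ P b y) (l : List β) (s : List α) (y : α) :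
    y ∈ l.foldl st s ↔ y ∈ s ∨ ∃ b ∈ l, P b y := by
  induction l generalizing s with
  | nil => simp
  | cons b l ih => rw [List.foldl_cons, ih, h]; simp; tauto

-- generic: counting fold equals countP
theorem pv_foldl_count {α : Type} (P : α → Prop) [DecidablePred P] (l : List α) (k : Int) :
    l.foldl (fun c e => if P e then c + 1 else c) k
      = k + (l.countP (fun e => decide (P e)) : Int) := by
  induction l generalizing k with
  | nil => simp
  | cons e l ih =>
    rw [List.foldl_cons]
    by_cases h : P e <;> simp [h, ih, List.countP_cons] <;> omega

theorem pv_foldl_count_pos {α : Type} (P : α → Prop) [DecidablePred P] (l : List α) :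
    (0 < l.foldl (fun c e => if P e then c + 1 else c) (0 : Int)) ↔ ∃ e ∈ l, P e := by
  rw [pv_foldl_count]
  simp [List.countP_pos_iff]

-- the flattened row-major cell list
def pvAll (n : Int) : List (Int × Int) :=
  (PySem.List.pyRange 0 n 1).flatMap (fun r => (PySem.List.pyRange 0 n 1).map (fun c => (r, c)))

theorem mem_pvAll {n : Int} (x : Int × Int) :
    x ∈ pvAll n ↔ 0 ≤ x.1 ∧ x.1 < n ∧ 0 ≤ x.2 ∧ x.2 < n := by
  obtain ⟨a, b⟩ := x
  unfold pvAll
  constructor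
  · intro h
    obtain ⟨r, hr, hx⟩ := List.mem_flatMap.mp h
    obtain ⟨c, hc, hcc⟩ := List.mem_map.mp hx
    rw [PySem.List.mem_pyRange_one] at hr hc
    obtain ⟨h1, h2⟩ := Prod.ext_iff.mp hcc
    simp only at h1 h2
    subst h1; subst h2
    exact ⟨hr.1, hr.2, hc.1, hc.2⟩
  · rintro ⟨h1, h2, h3, h4⟩
    exact List.mem_flatMap.mpr ⟨a, PySem.List.mem_pyRange_one.mpr ⟨h1, h2⟩,
      List.mem_map.mpr ⟨b, PySem.List.mem_pyRange_one.mpr ⟨h3, h4⟩, rfl⟩⟩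

theorem length_pvAll (n : Int) : (pvAll n).length = n.toNat * n.toNat := by
  simp [pvAll, List.length_flatMap]

-- A's classification scan, flattened and split into the two filters
theorem pv_partition {α : Type} (q : α → Prop) [DecidablePred q] (xs : List α)
    (ol : List α × List α) :
    xs.foldl (fun ol x => if q x then (ol.1, ol.2 ++ [x]) else (ol.1 ++ [x], ol.2)) ol
      = (ol.1 ++ xs.filter (fun x => decide (¬ q x)), ol.2 ++ xs.filter (fun x => decide (q x))) := by
  induction xs generalizing ol with
  | nil => simp
  | cons x xs ih =>
    rw [List.foldl_cons]
    by_cases h : q x <;> simp [h, ih]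


-- membership characterisation of A's candidate set (the triple nested fold)
theorem mem_candidates (m : List (List Int)) (n : Int) (occ : List (Int × Int)) (y : Int × Int) :
    (y ∈ occ.foldl (fun s rc =>
        (pvNbrs rc.1 rc.2 n).foldl (fun s n1 =>
          let s := if pvCell m n1.1 n1.2 = 0 then PySem.Set.add s n1 else s
          (pvNbrs n1.1 n1.2 n).foldl (fun s n2 =>
            if pvCell m n2.1 n2.2 = 0 then PySem.Set.add s n2 else s) s) s) PySem.Set.empty)
      ↔ ∃ o ∈ occ, ∃ n1 ∈ pvNbrs o.1 o.2 n,
          (y = n1 ∨ y ∈ pvNbrs n1.1 n1.2 n) ∧ pvCell m y.1 y.2 = 0 := by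
  have haddIf : ∀ (s : PySem.Set (Int × Int)) (z y : Int × Int),
      y ∈ (if pvCell m z.1 z.2 = 0 then PySem.Set.add s z else s) ↔
        y ∈ s ∨ (y = z ∧ pvCell m y.1 y.2 = 0) := by
    intro s z y
    by_cases h : pvCell m z.1 z.2 = 0
    · simp only [h, if_pos, PySem.Set.mem_add]
      constructor
      · rintro (hs | rfl)
        · exact Or.inl hs
        · exact Or.inr ⟨rfl, h⟩
      · rintro (hs | ⟨rfl, _⟩)
        · exact Or.inl hs
        · exact Or.inr rfl
    · simp only [h, if_neg, not_false_iff]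
      constructor
      · exact Or.inl
      · rintro (hs | ⟨rfl, hc⟩)
        · exact hs
        · exact absurd hc h
  have hinner : ∀ (n1 : Int × Int) (s : PySem.Set (Int × Int)) (y : Int × Int),
      y ∈ ((pvNbrs n1.1 n1.2 n).foldl (fun s n2 =>
            if pvCell m n2.1 n2.2 = 0 then PySem.Set.add s n2 else s)
            (if pvCell m n1.1 n1.2 = 0 then PySem.Set.add s n1 else s)) ↔
        y ∈ s ∨ ((y = n1 ∨ y ∈ pvNbrs n1.1 n1.2 n) ∧ pvCell m y.1 y.2 = 0) := by
    intro n1 s y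
    rw [pv_mem_foldl _ (fun n2 y => y = n2 ∧ pvCell m y.1 y.2 = 0) (fun s b y => haddIf s b y),
      haddIf]
    constructor
    · rintro ((hs | ⟨rfl, hc⟩) | ⟨n2, hn2, rfl, hc⟩)
      · exact Or.inl hs
      · exact Or.inr ⟨Or.inl rfl, hc⟩
      · exact Or.inr ⟨Or.inr hn2, hc⟩
    · rintro (hs | ⟨(rfl | hmem), hc⟩)
      · exact Or.inl (Or.inl hs)
      · exact Or.inl (Or.inr ⟨rfl, hc⟩)
      · exact Or.inr ⟨y, hmem, rfl, hc⟩
  have hmid : ∀ (s : PySem.Set (Int × Int)) (rc y : Int × Int),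
      y ∈ ((pvNbrs rc.1 rc.2 n).foldl (fun s n1 =>
            let s := if pvCell m n1.1 n1.2 = 0 then PySem.Set.add s n1 else s
            (pvNbrs n1.1 n1.2 n).foldl (fun s n2 =>
              if pvCell m n2.1 n2.2 = 0 then PySem.Set.add s n2 else s) s) s) ↔
        y ∈ s ∨ ∃ n1 ∈ pvNbrs rc.1 rc.2 n,
            (y = n1 ∨ y ∈ pvNbrs n1.1 n1.2 n) ∧ pvCell m y.1 y.2 = 0 := by
    intro s rc y
    exact pv_mem_foldl _
      (fun n1 y => (y = n1 ∨ y ∈ pvNbrs n1.1 n1.2 n) ∧ pvCell m y.1 y.2 = 0)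
      (fun s n1 y => hinner n1 s y) _ s y
  rw [pv_mem_foldl _
      (fun rc y => ∃ n1 ∈ pvNbrs rc.1 rc.2 n,
        (y = n1 ∨ y ∈ pvNbrs n1.1 n1.2 n) ∧ pvCell m y.1 y.2 = 0)
      (fun s rc y => hmid s rc y)]
  simp [PySem.Set.empty]

-- the candidate-set membership is B's 1-/2-hop proximity test (for an empty in-bounds cell)
theorem cand_iff_near (m : List (List Int)) (n : Int) (y : Int × Int)
    (hy : 0 ≤ y.1 ∧ y.1 < n ∧ 0 ≤ y.2 ∧ y.2 < n) (hemp : pvCell m y.1 y.2 = 0) :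
    (∃ o ∈ (pvAll n).filter (fun x => decide (¬ pvCell m x.1 x.2 = 0)),
        ∃ n1 ∈ pvNbrs o.1 o.2 n,
          (y = n1 ∨ y ∈ pvNbrs n1.1 n1.2 n) ∧ pvCell m y.1 y.2 = 0) ↔
      ((∃ a ∈ pvNbrs y.1 y.2 n, ¬ pvCell m a.1 a.2 = 0) ∨
        (∃ a ∈ pvNbrs y.1 y.2 n, ∃ b ∈ pvNbrs a.1 a.2 n, ¬ pvCell m b.1 b.2 = 0)) := by
  have hocc : ∀ o : Int × Int,
      o ∈ (pvAll n).filter (fun x => decide (¬ pvCell m x.1 x.2 = 0)) ↔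
        (0 ≤ o.1 ∧ o.1 < n ∧ 0 ≤ o.2 ∧ o.2 < n) ∧ ¬ pvCell m o.1 o.2 = 0 := by
    intro o; rw [List.mem_filter, mem_pvAll]; simp
  constructor
  · rintro ⟨o, ho, n1, hn1, hcase, -⟩
    rw [hocc] at ho
    rcases hcase with rfl | hyn1
    · -- y itself is a neighbour of the occupied cell o
      left
      exact ⟨o, (pvNbrs_symm ho.1 hy).mpr hn1, ho.2⟩
    · -- y is a neighbour of n1, which is a neighbour of o
      right
      have hbn1 := bounds_of_mem_pvNbrs hn1
      exact ⟨n1, (pvNbrs_symm hbn1 hy).mpr hyn1, o, (pvNbrs_symm ho.1 hbn1).mpr hn1, ho.2⟩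
  · rintro (⟨a, ha, hoa⟩ | ⟨a, ha, b, hb, hob⟩)
    · have hba := bounds_of_mem_pvNbrs ha
      exact ⟨a, (hocc a).mpr ⟨hba, hoa⟩, y, (pvNbrs_symm hba hy).mp ha, Or.inl rfl, hemp⟩
    · have hba := bounds_of_mem_pvNbrs ha
      have hbb := bounds_of_mem_pvNbrs hb
      exact ⟨b, (hocc b).mpr ⟨hbb, hob⟩, a, (pvNbrs_symm hbb hba).mp hb,
        Or.inr ((pvNbrs_symm hba hy).mp ha), hemp⟩

-- A's threatened-bridge count is positive exactly when B's boolean test fires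
theorem bridge_pos_iff (m : List (List Int)) (mv : Int × Int) (pid eid : Int) :
    0 < pvBridgeCount m mv pid eid ↔ pvHasBridge m mv pid eid = true := by
  unfold pvBridgeCount pvHasBridge
  simp only []
  set n := (m.length : Int) with hn
  set nm := pvNbrs mv.1 mv.2 n with hnmdef
  have hnd : nm.Nodup := nodup_pvNbrs _ _ _
  have hofl : PySem.Set.ofList nm = nm := PySem.Set.ofList_eq_self_of_nodup _ hnd
  have hown : ∀ e : Int × Int,
      ((PySem.Set.inter (PySem.Set.ofList nm) (PySem.Set.ofList (pvNbrs e.1 e.2 n))).foldl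
          (fun own p => if pvCell m p.1 p.2 = pid then own + 1 else own) (0 : Int))
        = ((nm.filter (fun p => decide (p ∈ pvNbrs e.1 e.2 n) &&
              decide (pvCell m p.1 p.2 = pid))).length : Int) := by
    intro e
    rw [pv_foldl_count (fun p : Int × Int => pvCell m p.1 p.2 = pid)]
    set common := PySem.Set.inter (PySem.Set.ofList nm) (PySem.Set.ofList (pvNbrs e.1 e.2 n)) with hc
    have hndc : common.Nodup := by
      rw [hc, hofl]; exact PySem.Set.nodup_inter _ _ hnd
    have hperm : common.Perm (nm.filter (fun p => decide (p ∈ pvNbrs e.1 e.2 n))) := by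
      apply (List.perm_ext_iff_of_nodup hndc (hnd.filter _)).mpr
      intro p
      rw [hc, PySem.Set.mem_inter, PySem.Set.mem_ofList, PySem.Set.mem_ofList, List.mem_filter]
      simp
    rw [hperm.countP_congr (fun x _ => rfl)]
    rw [List.countP_filter, ← List.countP_eq_length_filter]
    simp only [Int.zero_add]
    congr 1
    apply List.countP_congr
    intro p _
    simp [Bool.and_comm]
  have hstep : (fun (count : Int) (e : Int × Int) =>
      if pvCell m e.1 e.2 ≠ eid then count
      else
        if ((PySem.Set.inter (PySem.Set.ofList nm) (PySem.Set.ofList (pvNbrs e.1 e.2 n))).foldl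
            (fun own p => if pvCell m p.1 p.2 = pid then own + 1 else own) (0 : Int)) ≥ 2
        then count + 1 else count)
      = fun (count : Int) (e : Int × Int) =>
          if (pvCell m e.1 e.2 = eid ∧
              2 ≤ ((nm.filter (fun p => decide (p ∈ pvNbrs e.1 e.2 n) &&
                decide (pvCell m p.1 p.2 = pid))).length : Int)) then count + 1 else count := by
    funext count e
    rw [hown e]
    split_ifs <;> tauto
  rw [hstep, pv_foldl_count_pos]
  rw [List.any_eq_true]
  constructor
  · rintro ⟨e, he, h1, h2⟩
    refine ⟨e, he, ?_⟩
    simp only [Bool.and_eq_true, decide_eq_true_eq]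
    exact ⟨h1, by exact_mod_cast h2⟩
  · rintro ⟨e, he, h⟩
    simp only [Bool.and_eq_true, decide_eq_true_eq] at h
    exact ⟨e, he, h.1, by exact_mod_cast h.2⟩

set_option maxHeartbeats 1600000 in
theorem pv_main (matrix : List (List Int)) (player_id : Int) :
    pruned_expansion_moves_py matrix player_id = pruned_expansion_moves_py_alt matrix player_id := by
  unfold pruned_expansion_moves_py pruned_expansion_moves_py_alt
  simp only []
  have hn0 : (0 : Int) ≤ (matrix.length : Int) := Int.natCast_nonneg _
  -- A's classification scan, flattened into two filters of the row-major cell list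
  have h1 : ∀ (r : Int) (a : List (Int × Int) × List (Int × Int)),
      (PySem.List.pyRange 0 (matrix.length : Int) 1).foldl
        (fun ol c => if pvCell matrix r c = 0 then (ol.1, ol.2 ++ [(r, c)]) else (ol.1 ++ [(r, c)], ol.2)) a
      = ((PySem.List.pyRange 0 (matrix.length : Int) 1).map (fun c => (r, c))).foldl
          (fun ol (x : Int × Int) =>
            if pvCell matrix x.1 x.2 = 0 then (ol.1, ol.2 ++ [x]) else (ol.1 ++ [x], ol.2)) a := by
    intro r a; rw [List.foldl_map]
  have hscan : ((PySem.List.pyRange 0 (matrix.length : Int) 1).foldl (fun ol r =>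
        (PySem.List.pyRange 0 (matrix.length : Int) 1).foldl
          (fun (ol : List (Int × Int) × List (Int × Int)) c =>
            if pvCell matrix r c = 0 then (ol.1, ol.2 ++ [(r, c)]) else (ol.1 ++ [(r, c)], ol.2)) ol)
        (([], []) : List (Int × Int) × List (Int × Int)))
      = ((pvAll (matrix.length : Int)).filter (fun x => decide (¬ pvCell matrix x.1 x.2 = 0)),
         (pvAll (matrix.length : Int)).filter (fun x => decide (pvCell matrix x.1 x.2 = 0))) := by
    simp only [h1]
    rw [← List.foldl_flatMap]
    rw [pv_partition (fun x : Int × Int => pvCell matrix x.1 x.2 = 0)]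
    simp [pvAll]
  rw [hscan]
  -- B's legal-move comprehension is the same filter
  have h2 : ∀ r : Int,
      ((PySem.List.pyRange 0 (matrix.length : Int) 1).filter
          (fun c => decide (pvCell matrix r c = 0))).map (fun c => (r, c))
      = ((PySem.List.pyRange 0 (matrix.length : Int) 1).map (fun c => (r, c))).filter
          (fun x : Int × Int => decide (pvCell matrix x.1 x.2 = 0)) := by
    intro r; rw [List.filter_map]; rfl
  have hlegalB : ((PySem.List.pyRange 0 (matrix.length : Int) 1).flatMap (fun r =>
        ((PySem.List.pyRange 0 (matrix.length : Int) 1).filter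
          (fun c => decide (pvCell matrix r c = 0))).map (fun c => (r, c))))
      = (pvAll (matrix.length : Int)).filter (fun x => decide (pvCell matrix x.1 x.2 = 0)) := by
    simp only [h2]
    rw [← List.filter_flatMap]
    rfl
  rw [hlegalB]
  set n : Int := (matrix.length : Int) with hn
  set legal := (pvAll n).filter (fun x => decide (pvCell matrix x.1 x.2 = 0)) with hlegal
  set occ := (pvAll n).filter (fun x => decide (¬ pvCell matrix x.1 x.2 = 0)) with hocc
  simp only []
  -- the 'no occupied cell' tests agree
  have hsplit : legal.length + occ.length = n.toNat * n.toNat := by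
    rw [hlegal, hocc]
    have : (fun x : Int × Int => decide (¬ pvCell matrix x.1 x.2 = 0))
        = (fun x : Int × Int => ! decide (pvCell matrix x.1 x.2 = 0)) := by
      funext x; simp
    rw [this, ← length_pvAll n]
    exact (List.length_eq_length_filter_add _).symm
  have hocciff : occ = [] ↔ (legal.length : Int) = n * n := by
    constructor
    · intro h
      have h0 : occ.length = 0 := by rw [h]; rfl
      have : legal.length = n.toNat * n.toNat := by omega
      rw [this]
      push_cast [Int.toNat_of_nonneg hn0]
      ring
    · intro h
      have hcast : (legal.length : Int) = ((n.toNat * n.toNat : Nat) : Int) := by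
        rw [h]; push_cast [Int.toNat_of_nonneg hn0]; ring
      have : legal.length = n.toNat * n.toNat := by exact_mod_cast hcast
      have h0 : occ.length = 0 := by omega
      exact List.length_eq_zero_iff.mp h0
  -- the must-play lists agree
  have hmp : legal.foldl (fun acc mv =>
        if pvBridgeCount matrix mv player_id (if player_id = 1 then 2 else 1) > 0
        then acc ++ [mv] else acc) []
      = legal.filter (fun mv => pvHasBridge matrix mv player_id (if player_id = 1 then 2 else 1)) := by
    rw [PySem.List.foldl_append_ite_eq_filter]
    rw [List.nil_append]
    apply List.filter_congr
    intro mv _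
    have h := bridge_pos_iff matrix mv player_id (if player_id = 1 then 2 else 1)
    cases hB : pvHasBridge matrix mv player_id (if player_id = 1 then 2 else 1) <;> simp_all
  rw [hmp]
  -- the pruning loop is B's filter
  have hprune : ∀ cands : PySem.Set (Int × Int),
      (∀ y : Int × Int, y ∈ cands ↔ ∃ o ∈ occ, ∃ n1 ∈ pvNbrs o.1 o.2 n,
          (y = n1 ∨ y ∈ pvNbrs n1.1 n1.2 n) ∧ pvCell matrix y.1 y.2 = 0) →
      legal.foldl (fun acc mv =>
        if ¬ mv ∈ cands then acc
        else
          if ((pvNbrs mv.1 mv.2 n).foldl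
                (fun k p => if pvCell matrix p.1 p.2 = 0 then k + 1 else k) (0 : Int)) = 0 ∧
              legal.length > 1
          then acc else acc ++ [mv]) []
      = legal.filter (fun mv =>
          ((pvNbrs mv.1 mv.2 n).any (fun a => decide (¬ pvCell matrix a.1 a.2 = 0)) ||
            (pvNbrs mv.1 mv.2 n).any (fun a =>
              (pvNbrs a.1 a.2 n).any (fun b => decide (¬ pvCell matrix b.1 b.2 = 0)))) &&
          !(decide ((pvNbrs mv.1 mv.2 n).countP
              (fun a => decide (pvCell matrix a.1 a.2 = 0)) = 0) &&
            decide (legal.length > 1))) := by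
    intro cands hcands
    have hsingle : (fun (acc : List (Int × Int)) (mv : Int × Int) =>
        if ¬ mv ∈ cands then acc
        else
          if ((pvNbrs mv.1 mv.2 n).foldl
                (fun k p => if pvCell matrix p.1 p.2 = 0 then k + 1 else k) (0 : Int)) = 0 ∧
              legal.length > 1
          then acc else acc ++ [mv])
        = (fun acc mv =>
          if (mv ∈ cands ∧ ¬ (((pvNbrs mv.1 mv.2 n).foldl
                (fun k p => if pvCell matrix p.1 p.2 = 0 then k + 1 else k) (0 : Int)) = 0 ∧
              legal.length > 1))
          then acc ++ [mv] else acc) := by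
      funext acc mv
      split_ifs <;> tauto
    rw [hsingle, PySem.List.foldl_append_ite_eq_filter, List.nil_append]
    apply List.filter_congr
    intro mv hmv
    have hmv' := List.mem_filter.mp hmv
    have hbnd := (mem_pvAll mv).mp hmv'.1
    have hemp : pvCell matrix mv.1 mv.2 = 0 := by
      have := hmv'.2; simpa using this
    have hcand : mv ∈ cands ↔
        ((∃ a ∈ pvNbrs mv.1 mv.2 n, ¬ pvCell matrix a.1 a.2 = 0) ∨
          (∃ a ∈ pvNbrs mv.1 mv.2 n, ∃ b ∈ pvNbrs a.1 a.2 n, ¬ pvCell matrix b.1 b.2 = 0)) := by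
      rw [hcands mv, hocc]
      exact cand_iff_near matrix n mv hbnd hemp
    have hcount : ((pvNbrs mv.1 mv.2 n).foldl
          (fun k p => if pvCell matrix p.1 p.2 = 0 then k + 1 else k) (0 : Int))
        = ((pvNbrs mv.1 mv.2 n).countP (fun a => decide (pvCell matrix a.1 a.2 = 0)) : Int) := by
      rw [pv_foldl_count (fun p : Int × Int => pvCell matrix p.1 p.2 = 0)]
      simp
    apply Bool.coe_iff_coe.mp
    rw [decide_eq_true_eq, hcand, hcount]
    simp only [Bool.and_eq_true, Bool.or_eq_true, Bool.not_eq_true', Bool.and_eq_false_iff,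
      List.any_eq_true, decide_eq_true_eq, Bool.not_eq_true, decide_eq_false_iff_not]
    have hziff : (((pvNbrs mv.1 mv.2 n).countP
          (fun a => decide (pvCell matrix a.1 a.2 = 0)) : Int) = 0
        ↔ (pvNbrs mv.1 mv.2 n).countP (fun a => decide (pvCell matrix a.1 a.2 = 0)) = 0) := by
      omega
    exact and_congr_right fun _ => by rw [not_and_or, hziff]
  -- assemble the branches
  by_cases hLnil : legal = []
  · simp [hLnil]
  · simp only [if_neg hLnil]
    by_cases hOnil : occ = []
    · rw [if_pos hOnil, if_pos (hocciff.mp hOnil)]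
    · rw [if_neg hOnil, if_neg (fun h => hOnil (hocciff.mpr h))]
      by_cases hMP : legal.filter (fun mv => pvHasBridge matrix mv player_id
          (if player_id = 1 then 2 else 1)) ≠ []
      · rw [if_pos hMP, if_pos hMP]
      · rw [if_neg hMP, if_neg hMP]
        set cands := occ.foldl (fun s rc =>
          (pvNbrs rc.1 rc.2 n).foldl (fun s n1 =>
            let s := if pvCell matrix n1.1 n1.2 = 0 then PySem.Set.add s n1 else s
            (pvNbrs n1.1 n1.2 n).foldl (fun s n2 =>
              if pvCell matrix n2.1 n2.2 = 0 then PySem.Set.add s n2 else s) s) s)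
          PySem.Set.empty with hcandsdef
        have hcands : ∀ y : Int × Int, y ∈ cands ↔ ∃ o ∈ occ, ∃ n1 ∈ pvNbrs o.1 o.2 n,
            (y = n1 ∨ y ∈ pvNbrs n1.1 n1.2 n) ∧ pvCell matrix y.1 y.2 = 0 :=
          fun y => mem_candidates matrix n occ y
        rw [hprune cands hcands]
        by_cases hC : cands = []
        · rw [if_pos hC]
          have hpn : legal.filter (fun mv =>
              ((pvNbrs mv.1 mv.2 n).any (fun a => decide (¬ pvCell matrix a.1 a.2 = 0)) ||
                (pvNbrs mv.1 mv.2 n).any (fun a =>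
                  (pvNbrs a.1 a.2 n).any (fun b => decide (¬ pvCell matrix b.1 b.2 = 0)))) &&
              !(decide ((pvNbrs mv.1 mv.2 n).countP
                  (fun a => decide (pvCell matrix a.1 a.2 = 0)) = 0) &&
                decide (legal.length > 1))) = [] := by
            apply List.filter_eq_nil_iff.mpr
            intro mv hmv
            have hmv' := List.mem_filter.mp hmv
            have hbnd := (mem_pvAll mv).mp hmv'.1
            have hemp : pvCell matrix mv.1 mv.2 = 0 := by
              have := hmv'.2; simpa using this
            have hnone : ¬ ((∃ a ∈ pvNbrs mv.1 mv.2 n, ¬ pvCell matrix a.1 a.2 = 0) ∨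
                (∃ a ∈ pvNbrs mv.1 mv.2 n, ∃ b ∈ pvNbrs a.1 a.2 n,
                  ¬ pvCell matrix b.1 b.2 = 0)) := by
              rw [← cand_iff_near matrix n mv hbnd hemp, ← hocc, ← hcands mv, hC]
              simp
            have hfalse : ¬ ((((pvNbrs mv.1 mv.2 n).any
                  (fun a => decide (¬ pvCell matrix a.1 a.2 = 0)) ||
                (pvNbrs mv.1 mv.2 n).any (fun a =>
                  (pvNbrs a.1 a.2 n).any (fun b => decide (¬ pvCell matrix b.1 b.2 = 0)))) &&
              !(decide ((pvNbrs mv.1 mv.2 n).countP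
                  (fun a => decide (pvCell matrix a.1 a.2 = 0)) = 0) &&
                decide (legal.length > 1))) = true) := by
              simp only [Bool.and_eq_true, Bool.or_eq_true, List.any_eq_true, decide_eq_true_eq]
              rintro ⟨hnear, -⟩
              exact hnone hnear
            exact hfalse
          rw [hpn]
          simp
        · rw [if_neg hC]

-- ===== VERDICT (by name: the statement is the Claim_ definition above) =====
theorem pruned_expansion_moves_py_spec : Claim_equal_pruned_expansion_moves_py := by
  intro matrix player_id _ _
  unfold Spec_pruned_expansion_moves_py
  exact pv_main matrix player_id
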